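-- pv_equiv track=rewrite | github.com/elephoo/EulerProjects | Problem21.py | p_factors_to_divisors
-- ===== SOURCE A (Python) =====
-- def p_factors_to_divisors(primes_count, possible_factors):
--     # recursively determine the proper factors
--     # stopping criteria: if we are at the end, return the possible factors
--     if not primes_count:
--         return possible_factors
--
--     prime, count = primes_count[0]
--
--     # update the possibilities to the possible factors list
--     updated_possibilities= []
--     for factor in possible_factors:
--         for i in range(count + 1):
--             updated_possibilities.append(factor * prime ** i)
--
--     # recursively return: call with the remainder of the prime_counts and the possibility list
--     return p_factors_to_divisors(primes_count[1:], updated_possibilities)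
-- ===== SOURCE B (Python) =====
-- def p_factors_to_divisors(primes_count, possible_factors):
--     divisors = possible_factors
--     for prime, count in primes_count:
--         divisors = [factor * prime ** i for factor in divisors for i in range(count + 1)]
--     return divisors
-- ===== Notes on version B (the rewrite author's own statement) =====
-- stated objective: simpler
-- what changed: Replaces the tail recursion over primes_count and the explicit inner append loops by an iterative for-loop whose body is a single nested list comprehension reassigning divisors.
import Mathlib
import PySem

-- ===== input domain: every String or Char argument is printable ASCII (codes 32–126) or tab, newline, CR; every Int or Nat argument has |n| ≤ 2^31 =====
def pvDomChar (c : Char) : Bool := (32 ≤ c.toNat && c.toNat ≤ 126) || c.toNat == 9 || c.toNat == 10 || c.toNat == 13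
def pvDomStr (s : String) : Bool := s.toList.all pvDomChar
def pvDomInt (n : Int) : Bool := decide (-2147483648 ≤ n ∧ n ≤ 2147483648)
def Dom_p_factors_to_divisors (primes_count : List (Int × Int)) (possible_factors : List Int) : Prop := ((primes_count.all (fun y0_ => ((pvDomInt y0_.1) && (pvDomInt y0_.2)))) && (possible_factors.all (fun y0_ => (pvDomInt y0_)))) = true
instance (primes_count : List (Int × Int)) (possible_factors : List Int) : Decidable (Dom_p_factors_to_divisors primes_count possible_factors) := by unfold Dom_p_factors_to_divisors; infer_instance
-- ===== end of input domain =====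

-- B replaces A's tail recursion and explicit append loops by an iterative loop whose body
-- is a single nested comprehension (objective: simpler decomposition, same cost class).

-- ===== PORT A =====
-- literal port of A: recursion on primes_count; inner double loop appends factor * prime ** i.
-- 'prime ** i' with i ∈ range(count+1) (so 0 ≤ i) is exactly 'prime ^ i.toNat'.
def p_factors_to_divisors (primes_count : List (Int × Int)) (possible_factors : List Int) : List Int :=
  match primes_count with
  | [] => possible_factors
  | pc :: rest =>
    let prime := pc.1
    let count := pc.2
    let updated_possibilities :=
      possible_factors.foldl (fun acc factor =>
        (PySem.List.pyRange 0 (count + 1) 1).foldl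
          (fun acc2 i => acc2 ++ [factor * prime ^ i.toNat]) acc) []
    p_factors_to_divisors rest updated_possibilities

-- ===== PORT B =====
-- literal port of Source B: a foldl over primes_count; the nested comprehension
-- (factor outer, exponent inner) is flatMap/map in the same order.
def p_factors_to_divisors_alt (primes_count : List (Int × Int)) (possible_factors : List Int) : List Int :=
  primes_count.foldl (fun divisors pc =>
    divisors.flatMap (fun factor =>
      (PySem.List.pyRange 0 (pc.2 + 1) 1).map (fun i => factor * pc.1 ^ i.toNat))) possible_factors

-- ===== PRECONDITION & SPEC =====
def Spec_p_factors_to_divisors (primes_count : List (Int × Int)) (possible_factors : List Int) (out : List Int) : Prop := out = p_factors_to_divisors_alt primes_count possible_factors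
instance (primes_count : List (Int × Int)) (possible_factors : List Int) (out : List Int) : Decidable (Spec_p_factors_to_divisors primes_count possible_factors out) := by unfold Spec_p_factors_to_divisors; infer_instance

-- ===== CLAIM (what is proved, stated in full; the proofs are below) =====
def Claim_equal_p_factors_to_divisors : Prop := ∀ (primes_count : List (Int × Int)) (possible_factors : List Int), Dom_p_factors_to_divisors primes_count possible_factors → Spec_p_factors_to_divisors primes_count possible_factors (p_factors_to_divisors primes_count possible_factors)

-- ===== LEMMAS AND PROOFS =====

-- both one-prime steps produce the same flatMap.
theorem pv_step (prime count : Int) (pf : List Int) :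
    pf.foldl (fun acc factor =>
        (PySem.List.pyRange 0 (count + 1) 1).foldl
          (fun acc2 i => acc2 ++ [factor * prime ^ i.toNat]) acc) []
      = pf.flatMap (fun factor =>
          (PySem.List.pyRange 0 (count + 1) 1).map (fun i => factor * prime ^ i.toNat)) := by
  have hfun : (fun (acc : List Int) (factor : Int) =>
      (PySem.List.pyRange 0 (count + 1) 1).foldl
        (fun acc2 i => acc2 ++ [factor * prime ^ i.toNat]) acc)
      = fun acc factor => acc ++
        (PySem.List.pyRange 0 (count + 1) 1).map (fun i => factor * prime ^ i.toNat) := by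
    funext acc factor
    exact PySem.List.foldl_append_singleton_eq_map _ _ _
  rw [hfun, PySem.List.foldl_append_eq_flatMap, List.nil_append]

theorem pv_main : ∀ (pcs : List (Int × Int)) (pf : List Int),
    p_factors_to_divisors pcs pf = p_factors_to_divisors_alt pcs pf
  | [], pf => by simp [p_factors_to_divisors, p_factors_to_divisors_alt]
  | pc :: rest, pf => by
    rw [p_factors_to_divisors, p_factors_to_divisors_alt]
    simp only [List.foldl_cons]
    rw [pv_step pc.1 pc.2 pf, pv_main rest]
    rfl

-- ===== VERDICT (by name: the statement is the Claim_ definition above) =====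
theorem p_factors_to_divisors_spec : Claim_equal_p_factors_to_divisors :=
  fun pcs pf _ => pv_main pcs pf
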